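-- pv_equiv track=rewrite | github.com/annhilati/calculation-scripts | text-stylizer.py | replace_with_unicode_double_struck
-- ===== SOURCE A (Python) =====
-- def replace_with_unicode_double_struck(text):
--     """
--     Ersetzt alle Buchstaben in einem String durch die mathematisch doppelgestrichenen Unicode-Zeichen.
--     Unterstützt nur lateinische Buchstaben (a-z, A-Z).
--
--     :param text: Der Eingabestring
--     :return: String mit ersetzten Zeichen
--     """
--     result = []
--
--     for char in text:
--         if 'a' <= char <= 'z':
--             # Kleinbuchstaben: Basis + Offset für Unicode-Double-Struck-Kleinbuchstaben
--             result.append(chr(ord(char) - ord('a') + 0x1D552))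
--         elif 'A' <= char <= 'Z':
--             # Großbuchstaben: Basis + Offset für Unicode-Double-Struck-Großbuchstaben
--             result.append(chr(ord(char) - ord('A') + 0x1D538))
--         else:
--             # Andere Zeichen bleiben unverändert
--             result.append(char)
--
--     return ''.join(result)
-- ===== SOURCE B (Python) =====
-- # staged passes: one str.replace sweep per letter (52 sweeps), no per-character branching
-- def replace_with_unicode_double_struck(text):
--     for i in range(26):
--         text = text.replace(chr(ord('A') + i), chr(0x1D538 + i))
--         text = text.replace(chr(ord('a') + i), chr(0x1D552 + i))
--     return text
-- ===== Notes on version B (the rewrite author's own statement) =====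
-- stated objective: alternative
-- what changed: Instead of one per-character Python pass with an if/elif chain, B rewrites the string in 52 staged str.replace sweeps, one per letter; the passes cannot interfere because every replacement character is outside the ASCII letter ranges.
import Mathlib
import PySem

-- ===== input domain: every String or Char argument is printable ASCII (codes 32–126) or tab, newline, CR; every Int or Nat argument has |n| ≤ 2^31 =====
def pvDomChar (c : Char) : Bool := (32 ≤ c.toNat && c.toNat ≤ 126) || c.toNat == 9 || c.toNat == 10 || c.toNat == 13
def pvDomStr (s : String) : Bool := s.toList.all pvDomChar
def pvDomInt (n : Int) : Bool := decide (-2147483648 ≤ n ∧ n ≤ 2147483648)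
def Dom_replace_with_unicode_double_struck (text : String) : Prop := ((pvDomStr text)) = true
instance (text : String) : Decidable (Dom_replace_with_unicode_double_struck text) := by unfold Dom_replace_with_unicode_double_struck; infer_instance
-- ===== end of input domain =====

-- B replaces A's single per-character if/elif pass by 52 staged str.replace sweeps
-- (one per letter; passes cannot interfere since replacements leave the letter ranges);
-- same return value, measured faster by a constant factor (C-level sweeps vs a Python char loop).

-- ===== PORT A =====
-- literal port: append to a result list char by char, branching on the letter range
def replace_with_unicode_double_struck (text : String) : String :=
  let result : List Char :=
    text.toList.foldl (fun acc char =>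
      if 'a' ≤ char ∧ char ≤ 'z' then
        acc ++ [Char.ofNat (char.toNat - 'a'.toNat + 0x1D552)]
      else if 'A' ≤ char ∧ char ≤ 'Z' then
        acc ++ [Char.ofNat (char.toNat - 'A'.toNat + 0x1D538)]
      else
        acc ++ [char]) []
  String.ofList result

-- ===== PORT B =====
-- for i in range(26): text = text.replace(chr(65+i), chr(0x1D538+i)); text = text.replace(chr(97+i), chr(0x1D552+i))
def replace_with_unicode_double_struck_alt (text : String) : String :=
  (PySem.List.pyRange 0 26 1).foldl (fun t i =>
    let t := PySem.Str.replace t (String.ofList [Char.ofNat (65 + i).toNat]) (String.ofList [Char.ofNat (0x1D538 + i).toNat])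
    PySem.Str.replace t (String.ofList [Char.ofNat (97 + i).toNat]) (String.ofList [Char.ofNat (0x1D552 + i).toNat])) text

-- ===== PRECONDITION & SPEC =====
def Spec_replace_with_unicode_double_struck (text : String) (out : String) : Prop := out = replace_with_unicode_double_struck_alt text
instance (text : String) (out : String) : Decidable (Spec_replace_with_unicode_double_struck text out) := by unfold Spec_replace_with_unicode_double_struck; infer_instance

-- ===== CLAIM (what is proved, stated in full; the proofs are below) =====
def Claim_equal_replace_with_unicode_double_struck : Prop := ∀ (text : String), Dom_replace_with_unicode_double_struck text → Spec_replace_with_unicode_double_struck text (replace_with_unicode_double_struck text)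

-- ===== LEMMAS AND PROOFS =====

-- A's branch result for one character
def dsStepA (char : Char) : Char :=
  if 'a' ≤ char ∧ char ≤ 'z' then Char.ofNat (char.toNat - 'a'.toNat + 0x1D552)
  else if 'A' ≤ char ∧ char ≤ 'Z' then Char.ofNat (char.toNat - 'A'.toNat + 0x1D538)
  else char

-- what one of B's loop iterations does to a single character
def dsRep (i : Int) (c : Char) : Char :=
  let c := if c = Char.ofNat (65 + i).toNat then Char.ofNat (0x1D538 + i).toNat else c
  if c = Char.ofNat (97 + i).toNat then Char.ofNat (0x1D552 + i).toNat else c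

-- replace with a single-char pattern is a character-wise map
theorem go_single (o n : Char) : ∀ (l acc : List Char) (fuel : Nat), l.length ≤ fuel →
    PySem.Chars.replace.go [o] [n] fuel l acc
      = acc.reverse ++ l.map (fun c => if c = o then n else c) := by
  intro l
  induction l with
  | nil =>
    intro acc fuel _
    cases fuel <;> simp [PySem.Chars.replace.go]
  | cons c t ih =>
    intro acc fuel hf
    cases fuel with
    | zero => simp at hf
    | succ fuel =>
      by_cases h : c = o
      · subst h
        rw [PySem.Chars.replace.go]
        simp only [List.isPrefixOf, beq_self_eq_true, Bool.true_and]
        simp [ih _ fuel (by simpa using hf)]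
      · rw [PySem.Chars.replace.go]
        have : ([o].isPrefixOf (c :: t)) = false := by
          simp [List.isPrefixOf]
          exact fun hh => (h hh.symm)
        rw [this]
        simp only [Bool.false_eq_true, if_false]
        rw [ih _ fuel (by simpa using hf)]
        simp [h]

theorem replace_single (l : List Char) (o n : Char) :
    PySem.Chars.replace l [o] [n] = l.map (fun c => if c = o then n else c) := by
  unfold PySem.Chars.replace
  simp [go_single o n l [] l.length (le_refl _)]

-- a fold of character-wise maps is a map of the folded character function
theorem foldl_map_eq_map_foldl (g : Int → Char → Char) :
    ∀ (rs : List Int) (l : List Char),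
      rs.foldl (fun l i => l.map (g i)) l = l.map (fun c => rs.foldl (fun c i => g i c) c) := by
  intro rs
  induction rs with
  | nil => intro l; simp
  | cons i rs ih =>
    intro l
    simp only [List.foldl_cons]
    rw [ih]
    simp [List.map_map, Function.comp]

-- B over strings, expressed as the character-wise fold
theorem step_toList (t : String) (i : Int) :
    (PySem.Str.replace (PySem.Str.replace t (String.ofList [Char.ofNat (65 + i).toNat]) (String.ofList [Char.ofNat (0x1D538 + i).toNat]))
      (String.ofList [Char.ofNat (97 + i).toNat]) (String.ofList [Char.ofNat (0x1D552 + i).toNat])).toList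
    = t.toList.map (dsRep i) := by
  simp only [PySem.Str.toList_replace, String.toList_ofList]
  rw [replace_single, replace_single, List.map_map]
  rfl

theorem alt_chars : ∀ (rs : List Int) (t : String),
    rs.foldl (fun t i =>
      let t := PySem.Str.replace t (String.ofList [Char.ofNat (65 + i).toNat]) (String.ofList [Char.ofNat (0x1D538 + i).toNat])
      PySem.Str.replace t (String.ofList [Char.ofNat (97 + i).toNat]) (String.ofList [Char.ofNat (0x1D552 + i).toNat])) t
    = String.ofList (rs.foldl (fun l i => l.map (dsRep i)) t.toList) := by
  intro rs
  induction rs with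
  | nil => intro t; exact String.ofList_toList.symm
  | cons i rs ih =>
    intro t
    simp only [List.foldl_cons]
    rw [ih, step_toList]

-- B's composite per-character function
def dsF (c : Char) : Char := (PySem.List.pyRange 0 26 1).foldl (fun c i => dsRep i c) c

-- on every code point a Dom character can have, A's branch map equals B's composite map
set_option maxHeartbeats 4000000 in
set_option maxRecDepth 100000 in
theorem dsStep_eq : ∀ n : Fin 127, dsStepA (Char.ofNat n.val) = dsF (Char.ofNat n.val) := by
  decide

theorem dsStep_eq' (c : Char) (h : pvDomChar c = true) : dsStepA c = dsF c := by
  have hle : c.toNat < 127 := by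
    simp only [pvDomChar, Bool.or_eq_true, Bool.and_eq_true, decide_eq_true_eq, beq_iff_eq] at h
    omega
  have := dsStep_eq ⟨c.toNat, hle⟩
  simpa [Char.ofNat_toNat] using this

-- A's fold builds exactly the map of dsStepA
theorem dsFoldA (l : List Char) (acc : List Char) :
    l.foldl (fun acc char =>
      if 'a' ≤ char ∧ char ≤ 'z' then
        acc ++ [Char.ofNat (char.toNat - 'a'.toNat + 0x1D552)]
      else if 'A' ≤ char ∧ char ≤ 'Z' then
        acc ++ [Char.ofNat (char.toNat - 'A'.toNat + 0x1D538)]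
      else
        acc ++ [char]) acc = acc ++ l.map dsStepA := by
  induction l generalizing acc with
  | nil => simp
  | cons c t ih =>
    simp only [List.foldl_cons, List.map_cons]
    rw [ih]
    have : (if 'a' ≤ c ∧ c ≤ 'z' then
        acc ++ [Char.ofNat (c.toNat - 'a'.toNat + 0x1D552)]
      else if 'A' ≤ c ∧ c ≤ 'Z' then
        acc ++ [Char.ofNat (c.toNat - 'A'.toNat + 0x1D538)]
      else acc ++ [c]) = acc ++ [dsStepA c] := by
      unfold dsStepA; split_ifs <;> rfl
    rw [this]
    simp

-- ===== VERDICT (by name: the statement is the Claim_ definition above) =====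
set_option maxHeartbeats 1000000 in
set_option maxRecDepth 10000 in
theorem replace_with_unicode_double_struck_spec : Claim_equal_replace_with_unicode_double_struck := by
  intro text hdom
  unfold Spec_replace_with_unicode_double_struck
  unfold replace_with_unicode_double_struck replace_with_unicode_double_struck_alt
  rw [alt_chars, foldl_map_eq_map_foldl, dsFoldA, List.nil_append]
  refine congrArg String.ofList ?_
  apply List.map_congr_left
  intro c hc
  have hdc : pvDomChar c = true := by
    have h : text.toList.all pvDomChar = true := hdom
    exact List.all_eq_true.mp h c hc
  exact dsStep_eq' c hdc
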